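-- pv_equiv track=rewrite | github.com/JameZUK/fqdn-builder | domain_crawler.py | extract_parent_domains
-- ===== SOURCE A (Python) =====
-- def extract_parent_domains(domains):
--     """Extract parent domains from a list of domains."""
--     parent_domains = set()
--
--     for domain in domains:
--         parts = domain.split('.')
--         # For domains with 3+ parts, extract parent domains
--         # e.g., "styles.redditmedia.com" -> "redditmedia.com"
--         if len(parts) >= 3:
--             for i in range(1, len(parts) - 1):
--                 parent_domain = '.'.join(parts[i:])
--                 # Only add if it's not the original domain and has at least 2 parts
--                 if parent_domain != domain and len(parent_domain.split('.')) >= 2: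
--                     parent_domains.add(parent_domain)
--
--     return sorted(list(parent_domains))
-- ===== SOURCE B (Python) =====
-- def extract_parent_domains(domains):
--     """Extract parent domains from a list of domains."""
--     parent_domains = set()
--
--     for domain in domains:
--         # A parent domain is the suffix after any dot, provided that suffix
--         # still contains a dot itself (i.e. it has at least two labels).
--         for j, ch in enumerate(domain):
--             if ch == '.' and '.' in domain[j + 1:]:
--                 parent_domains.add(domain[j + 1:])
--
--     return sorted(parent_domains)
-- ===== Notes on version B (the rewrite author's own statement) =====
-- stated objective: alternative
-- what changed: B drops the split-into-parts array, the range loop over part indices, the slice/re-join of parts and A's always-true guards, and instead does a single character scan per domain, adding the suffix after each dot whenever that suffix still contains a dot; finish with sorted(set) as before.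
import Mathlib
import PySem

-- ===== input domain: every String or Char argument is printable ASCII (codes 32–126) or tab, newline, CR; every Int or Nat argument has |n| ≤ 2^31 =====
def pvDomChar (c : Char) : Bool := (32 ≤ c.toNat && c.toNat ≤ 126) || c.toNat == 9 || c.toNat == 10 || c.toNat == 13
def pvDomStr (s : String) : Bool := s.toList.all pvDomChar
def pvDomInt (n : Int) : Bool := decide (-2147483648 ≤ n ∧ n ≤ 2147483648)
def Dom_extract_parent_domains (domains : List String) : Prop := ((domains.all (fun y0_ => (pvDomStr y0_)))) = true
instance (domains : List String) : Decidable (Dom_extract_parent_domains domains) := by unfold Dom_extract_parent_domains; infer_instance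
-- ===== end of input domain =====

-- B replaces A's split/slice/re-join enumeration of suffixes by a single character scan that
-- collects the suffix after each dot when that suffix still contains a dot; same cost,
-- different decomposition (objective: alternative).

-- ===== PORT A =====
def extract_parent_domains (domains : List String) : List String :=
  let parent_domains : PySem.Set String :=
    domains.foldl (fun parent_domains domain =>
      let parts := (PySem.Str.split? domain ".").getD []
      if 3 ≤ parts.length then
        (PySem.List.pyRange 1 ((parts.length : Int) - 1) 1).foldl (fun parent_domains i =>
          let parent_domain := PySem.Str.join "." (PySem.List.slice parts (some i) none)
          if parent_domain ≠ domain ∧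
              2 ≤ ((PySem.Str.split? parent_domain ".").getD []).length then
            PySem.Set.add parent_domains parent_domain
          else parent_domains) parent_domains
      else parent_domains) PySem.Set.empty
  PySem.List.sorted parent_domains (fun x => x) false

-- ===== PORT B =====
def extract_parent_domains_alt (domains : List String) : List String :=
  let parent_domains : PySem.Set String :=
    domains.foldl (fun parent_domains domain =>
      (PySem.List.enumerate domain.toList 0).foldl (fun parent_domains jc =>
        if jc.2 = '.' ∧
            PySem.Str.isIn "." (PySem.Str.slice domain (some (jc.1 + 1)) none) = true then
          PySem.Set.add parent_domains (PySem.Str.slice domain (some (jc.1 + 1)) none)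
        else parent_domains) parent_domains) PySem.Set.empty
  PySem.List.sorted parent_domains (fun x => x) false



-- ===== PRECONDITION & SPEC =====
def Spec_extract_parent_domains (domains : List String) (out : List String) : Prop := out = extract_parent_domains_alt domains
instance (domains : List String) (out : List String) : Decidable (Spec_extract_parent_domains domains out) := by unfold Spec_extract_parent_domains; infer_instance

-- ===== CLAIM (what is proved, stated in full; the proofs are below) =====
def Claim_equal_extract_parent_domains : Prop := ∀ (domains : List String), Dom_extract_parent_domains domains → Spec_extract_parent_domains domains (extract_parent_domains domains)

-- ===== LEMMAS AND PROOFS =====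

def pvSplitA : List Char → List (List Char)
  | [] => [[]]
  | c :: rest =>
    if c = '.' then [] :: pvSplitA rest
    else
      match pvSplitA rest with
      | [] => [[c]]
      | h :: t => (c :: h) :: t
def pvConsHead (pre : List Char) : List (List Char) → List (List Char)
  | [] => [pre]
  | h :: t => (pre ++ h) :: t
theorem pvSplitA_ne_nil (cs : List Char) : pvSplitA cs ≠ [] := by
  cases cs with
  | nil => simp [pvSplitA]
  | cons c rest =>
    simp only [pvSplitA]
    split
    · simp
    · split <;> simp
theorem pvSplitOn_go_eq (fuel : Nat) : ∀ (l cur : List Char) (acc : List (List Char)),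
    l.length < fuel →
    PySem.Chars.splitOn.go ['.'] fuel l cur acc = acc.reverse ++ pvConsHead cur.reverse (pvSplitA l) := by
  induction fuel with
  | zero => intro l cur acc h; omega
  | succ n ih =>
    intro l cur acc h
    cases l with
    | nil =>
      rw [PySem.Chars.splitOn.go.eq_def]
      simp [pvSplitA, pvConsHead]
    | cons c rest =>
      rw [PySem.Chars.splitOn.go.eq_def]
      simp only []
      by_cases hc : c = '.'
      · subst hc
        have hpre : List.isPrefixOf ['.'] ('.' :: rest) = true := by simp [List.isPrefixOf]
        simp only [hpre, if_pos]
        rw [show List.drop (['.'] : List Char).length ('.' :: rest) = rest from rfl]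
        rw [ih rest [] (cur.reverse :: acc) (by simp at h ⊢; omega)]
        obtain ⟨hd, tl, hht⟩ := List.exists_cons_of_ne_nil (pvSplitA_ne_nil rest)
        simp [pvSplitA, hht, pvConsHead]
      · have hpre : List.isPrefixOf ['.'] (c :: rest) = false := by
          simp [List.isPrefixOf]; exact fun hh => hc hh.symm
        simp only [hpre, Bool.false_eq_true, if_false]
        rw [ih rest (c :: cur) acc (by simp at h ⊢; omega)]
        congr 1
        simp only [pvSplitA, if_neg hc]
        cases hx : pvSplitA rest with
        | nil => exact absurd hx (pvSplitA_ne_nil rest)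
        | cons hd tl => simp [pvConsHead]

theorem pvSplitOn_eq (cs : List Char) : PySem.Chars.splitOn cs ['.'] = pvSplitA cs := by
  have h := pvSplitOn_go_eq (cs.length + 1) cs [] [] (by omega)
  rw [PySem.Chars.splitOn] at *
  rw [h]
  obtain ⟨hd, tl, hht⟩ := List.exists_cons_of_ne_nil (pvSplitA_ne_nil cs)
  simp [hht, pvConsHead]

theorem pvSplitA_dotfree (cs : List Char) : ∀ p ∈ pvSplitA cs, '.' ∉ p := by
  induction cs with
  | nil => simp [pvSplitA]
  | cons c rest ih =>
    simp only [pvSplitA]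
    by_cases hc : c = '.'
    · simp only [if_pos hc]
      intro p hp
      rcases List.mem_cons.mp hp with h | h
      · simp [h]
      · exact ih p h
    · simp only [if_neg hc]
      cases hx : pvSplitA rest with
      | nil => exact absurd hx (pvSplitA_ne_nil rest)
      | cons hd tl =>
        intro p hp
        rcases List.mem_cons.mp hp with h | h
        · subst h
          intro hmem
          rcases List.mem_cons.mp hmem with h' | h'
          · exact hc h'.symm
          · exact ih hd (by rw [hx]; exact List.mem_cons_self) h'
        · exact ih p (by rw [hx]; exact List.mem_cons_of_mem _ h)

theorem pvJoin_splitA (cs : List Char) : PySem.Chars.join ['.'] (pvSplitA cs) = cs := by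
  induction cs with
  | nil => simp [pvSplitA, PySem.Chars.join_singleton]
  | cons c rest ih =>
    simp only [pvSplitA]
    by_cases hc : c = '.'
    · simp only [if_pos hc]
      obtain ⟨hd, tl, hht⟩ := List.exists_cons_of_ne_nil (pvSplitA_ne_nil rest)
      rw [hht] at ih ⊢
      rw [PySem.Chars.join_cons_cons, ih, hc]
      simp
    · simp only [if_neg hc]
      cases hx : pvSplitA rest with
      | nil => exact absurd hx (pvSplitA_ne_nil rest)
      | cons hd tl =>
        rw [hx] at ih
        cases tl with
        | nil =>
          rw [PySem.Chars.join_singleton] at ih ⊢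
          rw [ih]
        | cons q t =>
          rw [PySem.Chars.join_cons_cons] at ih ⊢
          rw [← ih]
          simp

theorem pvMem_dot_iff (cs : List Char) : '.' ∈ cs ↔ 2 ≤ (pvSplitA cs).length := by
  induction cs with
  | nil => simp [pvSplitA]
  | cons c rest ih =>
    simp only [pvSplitA]
    by_cases hc : c = '.'
    · simp only [if_pos hc]
      obtain ⟨hd, tl, hht⟩ := List.exists_cons_of_ne_nil (pvSplitA_ne_nil rest)
      simp [hc, hht]
    · simp only [if_neg hc]
      cases hx : pvSplitA rest with
      | nil => exact absurd hx (pvSplitA_ne_nil rest)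
      | cons hd tl =>
        rw [hx] at ih
        simp only [List.mem_cons, List.length_cons] at ih ⊢
        constructor
        · intro h
          rcases h with h | h
          · exact absurd h.symm hc
          · exact ih.mp h
        · intro h; exact Or.inr (ih.mpr h)

theorem pvSplitA_dotfree_self (p : List Char) (h : '.' ∉ p) : pvSplitA p = [p] := by
  induction p with
  | nil => simp [pvSplitA]
  | cons c rest ih =>
    simp only [List.mem_cons, not_or] at h
    simp only [pvSplitA, if_neg (fun hh : c = '.' => h.1 hh.symm), ih h.2]

theorem pvSplitA_append_dot (p cs : List Char) (h : '.' ∉ p) :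
    pvSplitA (p ++ '.' :: cs) = p :: pvSplitA cs := by
  induction p with
  | nil => simp [pvSplitA]
  | cons c rest ih =>
    simp only [List.mem_cons, not_or] at h
    simp only [List.cons_append, pvSplitA, if_neg (fun hh : c = '.' => h.1 hh.symm), ih h.2]

theorem pvSplitA_join (ps : List (List Char)) (hne : ps ≠ []) (hdf : ∀ p ∈ ps, '.' ∉ p) :
    pvSplitA (PySem.Chars.join ['.'] ps) = ps := by
  induction ps with
  | nil => exact absurd rfl hne
  | cons p qs ih =>
    cases qs with
    | nil =>
      rw [PySem.Chars.join_singleton]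
      exact pvSplitA_dotfree_self p (hdf p List.mem_cons_self)
    | cons q t =>
      rw [PySem.Chars.join_cons_cons]
      rw [show p ++ ['.'] ++ PySem.Chars.join ['.'] (q :: t) = p ++ '.' :: PySem.Chars.join ['.'] (q :: t) by simp]
      rw [pvSplitA_append_dot _ _ (hdf p List.mem_cons_self)]
      rw [ih (by simp) (fun r hr => hdf r (List.mem_cons_of_mem _ hr))]

theorem pvJoin_len_lt (p : List Char) (ps : List (List Char)) (h : ps ≠ []) :
    (PySem.Chars.join ['.'] ps).length < (PySem.Chars.join ['.'] (p :: ps)).length := by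
  obtain ⟨q, t, hqt⟩ := List.exists_cons_of_ne_nil h
  subst hqt
  rw [PySem.Chars.join_cons_cons]
  simp
  omega

theorem pvJoin_len_drop_le (ps : List (List Char)) (k : Nat) :
    (PySem.Chars.join ['.'] (ps.drop k)).length ≤ (PySem.Chars.join ['.'] ps).length := by
  induction ps generalizing k with
  | nil => simp
  | cons p t ih =>
    cases k with
    | zero => simp
    | succ k' =>
      rw [List.drop_succ_cons]
      refine le_trans (ih k') ?_
      cases t with
      | nil => simp [PySem.Chars.join_nil, PySem.Chars.join_singleton]
      | cons q t' => exact le_of_lt (pvJoin_len_lt p (q :: t') (by simp))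

def pvAsuf : List (List Char) → List (List Char)
  | [] => []
  | _ :: ps => if 2 ≤ ps.length then PySem.Chars.join ['.'] ps :: pvAsuf ps else []

def pvBlist : List Char → List (List Char)
  | [] => []
  | c :: t => (if c = '.' ∧ '.' ∈ t then [t] else []) ++ pvBlist t

theorem pvAsuf_cons (p : List Char) (ps : List (List Char)) :
    pvAsuf (p :: ps) = if 2 ≤ ps.length then PySem.Chars.join ['.'] ps :: pvAsuf ps else [] := rfl

theorem pvRangeMap_eq_asuf (ps : List (List Char)) :
    (List.range (ps.length - 2)).map (fun j => PySem.Chars.join ['.'] (ps.drop (j + 1))) = pvAsuf ps := by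
  induction ps with
  | nil => simp [pvAsuf]
  | cons p qs ih =>
    rw [pvAsuf_cons]
    by_cases h : 2 ≤ qs.length
    · have hlen : (p :: qs).length - 2 = (qs.length - 2) + 1 := by simp; omega
      rw [hlen, List.range_succ_eq_map, if_pos h]
      simp only [List.map_cons, List.map_map]
      rw [← ih]
      congr 1
    · have hlen : (p :: qs).length - 2 = 0 := by simp; omega
      rw [hlen, if_neg h]
      simp

theorem pvBlist_eq_asuf (cs : List Char) : pvBlist cs = pvAsuf (pvSplitA cs) := by
  induction cs with
  | nil => simp [pvBlist, pvSplitA, pvAsuf]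
  | cons c rest ih =>
    simp only [pvBlist, pvSplitA]
    by_cases hc : c = '.'
    · simp only [if_pos hc]
      obtain ⟨hd, tl, hht⟩ := List.exists_cons_of_ne_nil (pvSplitA_ne_nil rest)
      rw [hht] at ih ⊢
      rw [pvAsuf_cons]
      by_cases hdot : '.' ∈ rest
      · have h2 : 2 ≤ (pvSplitA rest).length := (pvMem_dot_iff rest).mp hdot
        rw [hht] at h2
        simp only [List.length_cons] at h2 ⊢
        rw [if_pos (by omega : 2 ≤ tl.length + 1)]
        rw [if_pos ⟨hc, hdot⟩]
        rw [← hht, pvJoin_splitA]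
        simp [ih, hht]
      · have h2 : ¬ 2 ≤ (pvSplitA rest).length := fun hh => hdot ((pvMem_dot_iff rest).mpr hh)
        rw [hht] at h2
        simp only [List.length_cons] at h2 ⊢
        rw [if_neg (by omega : ¬ 2 ≤ tl.length + 1)]
        rw [if_neg (fun hh => hdot hh.2)]
        have hnil : pvAsuf (hd :: tl) = [] := by
          rw [pvAsuf_cons, if_neg (by omega : ¬ 2 ≤ tl.length)]
        simp [ih, hnil]
    · simp only [if_neg hc]
      cases hx : pvSplitA rest with
      | nil => exact absurd hx (pvSplitA_ne_nil rest)
      | cons hd tl =>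
        rw [hx] at ih
        rw [pvAsuf_cons] at ih
        rw [pvAsuf_cons]
        simp [hc, ih]

theorem pvSlice_toList (d : String) (n : Nat) :
    PySem.Str.slice d (some ((n : Int) + 1)) none = String.ofList (d.toList.drop (n + 1)) := by
  rw [← String.toList_inj, PySem.Str.toList_slice, String.toList_ofList,
    PySem.Chars.slice_eq_listSlice]
  rw [show ((n : Int) + 1) = ((n + 1 : Nat) : Int) by push_cast; ring]
  rw [PySem.List.slice_from _ (by positivity)]
  simp

theorem pvB_list (d : String) : ∀ (suf : List Char) (n : Nat), d.toList.drop n = suf →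
    ((PySem.List.enumerate suf (n : Int)).filter (fun jc =>
        decide (jc.2 = '.' ∧ PySem.Str.isIn "." (PySem.Str.slice d (some (jc.1 + 1)) none) = true))).map
      (fun jc => PySem.Str.slice d (some (jc.1 + 1)) none) = (pvBlist suf).map String.ofList := by
  intro suf
  induction suf with
  | nil => intro n _; simp [pvBlist]
  | cons c t ih =>
    intro n hn
    rw [PySem.List.enumerate.eq_2]
    have hdt : d.toList.drop (n + 1) = t := by
      rw [← List.tail_drop, hn]; rfl
    have hslice : PySem.Str.slice d (some ((n : Int) + 1)) none = String.ofList t := by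
      rw [pvSlice_toList, hdt]
    have hcast : (n : Int) + 1 = ((n + 1 : Nat) : Int) := by push_cast; ring
    have hiin : PySem.Str.isIn "." (String.ofList t) = true ↔ '.' ∈ t := by
      simp only [PySem.Str.isIn_iff_infix, String.toList_ofList,
        show (".".toList : List Char) = ['.'] from rfl]
      exact List.singleton_infix_iff '.' t
    rw [List.filter_cons]
    by_cases hcnd : c = '.' ∧ '.' ∈ t
    · rw [if_pos (by simp only [hslice]; exact decide_eq_true ⟨hcnd.1, hiin.mpr hcnd.2⟩)]
      simp only [List.map_cons]
      rw [show (((n : Int), c).1 + 1) = (n : Int) + 1 from rfl, hslice]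
      rw [hcast, ih (n + 1) hdt]
      simp [pvBlist, hcnd]
    · rw [if_neg (by
        simp only [hslice, decide_eq_true_eq]
        intro hh; exact hcnd ⟨hh.1, hiin.mp hh.2⟩)]
      rw [hcast, ih (n + 1) hdt]
      simp only [pvBlist]
      rw [if_neg hcnd]
      simp

theorem pvParts_eq (d : String) :
    (PySem.Str.split? d ".").getD [] = (pvSplitA d.toList).map String.ofList := by
  have h := PySem.Str.split?_map d "."
  have hsep : (".".toList : List Char) = ['.'] := rfl
  rw [hsep, PySem.Chars.split?] at h
  rw [if_neg (by simp)] at h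
  rw [pvSplitOn_eq] at h
  cases hL : PySem.Str.split? d "." with
  | none => rw [hL] at h; simp at h
  | some L =>
    rw [hL] at h
    simp only [Option.map_some, Option.some.injEq] at h
    simp only [Option.getD_some]
    rw [← h, List.map_map]
    simp [Function.comp_def, String.ofList_toList]

theorem pvPyRange_eq (n : Nat) (h : 3 ≤ n) :
    PySem.List.pyRange 1 ((n : Int) - 1) 1 = (List.range (n - 2)).map (fun j : Nat => 1 + (j : Int)) := by
  rw [PySem.List.pyRange]
  rw [if_neg (by norm_num)]
  have h1 : (0 : Int) < 1 := by norm_num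
  rw [if_pos h1, if_pos (by omega : (1 : Int) < (n : Int) - 1)]
  have hc : (((n : Int) - 1 - 1 + 1 - 1) / 1).toNat = n - 2 := by omega
  rw [hc]
  simp

theorem pvAsuf_short (ps : List (List Char)) (h : ps.length ≤ 2) : pvAsuf ps = [] := by
  cases ps with
  | nil => rfl
  | cons p qs => rw [pvAsuf_cons, if_neg (by simp at h; omega)]

theorem pvJoinStr (X : List (List Char)) :
    PySem.Str.join "." (X.map String.ofList) = String.ofList (PySem.Chars.join ['.'] X) := by
  rw [← String.toList_inj, PySem.Str.toList_join, String.toList_ofList, List.map_map]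
  simp [Function.comp_def, String.toList_ofList]

theorem pvCond_true (d : String) (i : Int) (hi : 1 ≤ i) (hin : i < ((pvSplitA d.toList).length : Int) - 1) :
    (PySem.Str.join "." (PySem.List.slice ((pvSplitA d.toList).map String.ofList) (some i) none) ≠ d ∧
      2 ≤ ((PySem.Str.split? (PySem.Str.join "." (PySem.List.slice ((pvSplitA d.toList).map String.ofList) (some i) none)) ".").getD []).length) := by
  have hk : (i.toNat : Int) = i := Int.toNat_of_nonneg (by omega)
  have hk1 : 1 ≤ i.toNat := by omega
  have hkn : i.toNat + 2 ≤ (pvSplitA d.toList).length := by omega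
  rw [PySem.List.slice_from _ (by omega : (0:Int) ≤ i), ← List.map_drop]
  rw [pvJoinStr]
  have hdf : ∀ p ∈ (pvSplitA d.toList).drop i.toNat, '.' ∉ p :=
    fun p hp => pvSplitA_dotfree d.toList p (List.mem_of_mem_drop hp)
  have hne : (pvSplitA d.toList).drop i.toNat ≠ [] := by
    intro hh
    have hlen := congrArg List.length hh
    simp at hlen
    omega
  constructor
  · intro heq
    have hlen := congrArg (fun s => s.toList.length) heq
    simp only [String.toList_ofList] at hlen
    obtain ⟨p, t, hpt⟩ := List.exists_cons_of_ne_nil (pvSplitA_ne_nil d.toList)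
    have hlt : (PySem.Chars.join ['.'] ((pvSplitA d.toList).drop i.toNat)).length <
        (PySem.Chars.join ['.'] (pvSplitA d.toList)).length := by
      rw [hpt]
      rw [show (p :: t).drop i.toNat = t.drop (i.toNat - 1) by
        cases hk' : i.toNat with
        | zero => omega
        | succ k' => simp]
      refine lt_of_le_of_lt (pvJoin_len_drop_le t (i.toNat - 1)) ?_
      apply pvJoin_len_lt
      intro hh
      rw [hpt] at hkn
      simp [hh] at hkn
    rw [pvJoin_splitA d.toList, hlen] at hlt
    exact lt_irrefl _ hlt
  · rw [pvParts_eq]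
    rw [String.toList_ofList]
    rw [pvSplitA_join _ hne hdf]
    simp
    omega

set_option maxHeartbeats 400000 in
theorem pvStepA (st : PySem.Set String) (d : String) :
    (let parts := (PySem.Str.split? d ".").getD []
     if 3 ≤ parts.length then
       (PySem.List.pyRange 1 ((parts.length : Int) - 1) 1).foldl (fun acc i =>
         let parent_domain := PySem.Str.join "." (PySem.List.slice parts (some i) none)
         if parent_domain ≠ d ∧
             2 ≤ ((PySem.Str.split? parent_domain ".").getD []).length then
           PySem.Set.add acc parent_domain
         else acc) st
     else st)
    = PySem.Set.update st ((pvAsuf (pvSplitA d.toList)).map String.ofList) := by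
  simp only [pvParts_eq, List.length_map]
  by_cases h3 : 3 ≤ (pvSplitA d.toList).length
  · rw [if_pos h3]
    have hcong := PySem.List.foldl_congr_mem
      (PySem.List.pyRange 1 (((pvSplitA d.toList).length : Int) - 1) 1)
      (fun acc i =>
        if PySem.Str.join "." (PySem.List.slice ((pvSplitA d.toList).map String.ofList) (some i) none) ≠ d ∧
            2 ≤ (pvSplitA (PySem.Str.join "." (PySem.List.slice ((pvSplitA d.toList).map String.ofList) (some i) none)).toList).length then
          PySem.Set.add acc
            (PySem.Str.join "." (PySem.List.slice ((pvSplitA d.toList).map String.ofList) (some i) none))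
        else acc)
      (fun acc i => PySem.Set.add acc
        (PySem.Str.join "." (PySem.List.slice ((pvSplitA d.toList).map String.ofList) (some i) none)))
      st
      (by
        intro acc i hi
        obtain ⟨h1, h2⟩ := PySem.List.mem_pyRange_one.mp hi
        have hct := pvCond_true d i h1 (by exact_mod_cast h2)
        rw [pvParts_eq, List.length_map] at hct
        exact if_pos hct)
    rw [hcong, ← PySem.Set.update_map_eq_foldl_add]
    congr 1
    rw [pvPyRange_eq _ h3, List.map_map]
    rw [← pvRangeMap_eq_asuf]
    rw [List.map_map]
    apply List.map_congr_left
    intro j hj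
    simp only [Function.comp_apply]
    rw [PySem.List.slice_from _ (by positivity : (0:Int) ≤ 1 + (j:Int))]
    rw [show ((1 : Int) + (j:Int)).toNat = j + 1 by omega]
    rw [← List.map_drop, pvJoinStr]
  · rw [if_neg h3, pvAsuf_short _ (by omega), List.map_nil, PySem.Set.update_nil]

theorem pvStepB (st : PySem.Set String) (d : String) :
    (PySem.List.enumerate d.toList 0).foldl (fun acc jc =>
      if jc.2 = '.' ∧
          PySem.Str.isIn "." (PySem.Str.slice d (some (jc.1 + 1)) none) = true then
        PySem.Set.add acc (PySem.Str.slice d (some (jc.1 + 1)) none)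
      else acc) st
    = PySem.Set.update st ((pvAsuf (pvSplitA d.toList)).map String.ofList) := by
  rw [PySem.List.foldl_ite_eq_foldl_filter
    (p := fun jc : Int × Char => jc.2 = '.' ∧
      PySem.Str.isIn "." (PySem.Str.slice d (some (jc.1 + 1)) none) = true)
    (f := fun acc jc => PySem.Set.add acc (PySem.Str.slice d (some (jc.1 + 1)) none))]
  rw [← PySem.Set.update_map_eq_foldl_add]
  have hb := pvB_list d d.toList 0 rfl
  rw [Nat.cast_zero] at hb
  rw [hb, pvBlist_eq_asuf]


-- ===== VERDICT (by name: the statement is the Claim_ definition above) =====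
theorem extract_parent_domains_spec : Claim_equal_extract_parent_domains := by
  intro domains _
  unfold Spec_extract_parent_domains
  unfold extract_parent_domains extract_parent_domains_alt
  exact congrArg (fun s => PySem.List.sorted s (fun x => x) false)
    (PySem.List.foldl_congr_mem domains _ _ PySem.Set.empty
      (fun acc x _ => (pvStepA acc x).trans (pvStepB acc x).symm))
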